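-- pv_equiv track=rewrite | github.com/oimiragieo/tensor-grep | benchmarks/build_external_agent_patch_driver_scorecard.py | _validation_fit
-- ===== SOURCE A (Python) =====
-- def _validation_fit(primary_file: str, validation_commands: list[str]) -> str:
--     lower_file = primary_file.lower()
--     joined = " ".join(validation_commands).lower()
--     if lower_file.endswith(".rs"):
--         return "strong" if "cargo test" in joined else "weak"
--     if lower_file.endswith((".ts", ".tsx", ".js", ".jsx")):
--         if any(
--             token in joined for token in ("pnpm test", "npm test", "yarn test", "vitest", "jest")
--         ):
--             return "strong"
--         return "weak"
--     if lower_file.endswith(".py"):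
--         if any(token in joined for token in ("pytest", "python -m pytest", "uv run pytest")):
--             return "strong"
--         return "weak"
--     return "unknown"
-- ===== SOURCE B (Python) =====
-- _JS_TOKENS = ("pnpm test", "npm test", "yarn test", "vitest", "jest")
-- _EXT_TOKENS = {
--     "rs": ("cargo test",),
--     "ts": _JS_TOKENS,
--     "tsx": _JS_TOKENS,
--     "js": _JS_TOKENS,
--     "jsx": _JS_TOKENS,
--     "py": ("pytest", "python -m pytest", "uv run pytest"),
-- }
--
--
-- def _validation_fit(primary_file: str, validation_commands: list[str]) -> str:
--     # Scan the lowered filename backwards once, collecting the extension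
--     # up to the last dot; then a single dict lookup picks the token set.
--     ext_rev = []
--     for ch in reversed(primary_file.lower()):
--         if ch == ".":
--             break
--         ext_rev.append(ch)
--     else:
--         return "unknown"
--     tokens = _EXT_TOKENS.get("".join(reversed(ext_rev)))
--     if tokens is None:
--         return "unknown"
--     joined = " ".join(validation_commands).lower()
--     return "strong" if any(token in joined for token in tokens) else "weak"
-- ===== Notes on version B (the rewrite author's own statement) =====
-- stated objective: alternative
-- what changed: Instead of testing six suffixes with endswith, B extracts the file extension in one backwards scan to the last dot (for/else) and resolves it with a single dict lookup from extension to token set.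
import Mathlib
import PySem

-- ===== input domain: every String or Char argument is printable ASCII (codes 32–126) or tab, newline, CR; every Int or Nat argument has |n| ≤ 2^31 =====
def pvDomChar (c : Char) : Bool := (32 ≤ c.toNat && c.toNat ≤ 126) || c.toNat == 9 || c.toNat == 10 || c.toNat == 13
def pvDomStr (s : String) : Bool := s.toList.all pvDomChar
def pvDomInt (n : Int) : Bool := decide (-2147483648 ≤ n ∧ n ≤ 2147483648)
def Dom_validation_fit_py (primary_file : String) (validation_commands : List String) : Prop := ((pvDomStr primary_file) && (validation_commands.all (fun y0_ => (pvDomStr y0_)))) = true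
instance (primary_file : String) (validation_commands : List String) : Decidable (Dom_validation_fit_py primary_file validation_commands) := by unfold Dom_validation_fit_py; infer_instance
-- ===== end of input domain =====

-- B replaces A's chain of endswith tests by one backwards scan extracting the
-- extension after the last dot plus a single dict lookup (objective: alternative).

-- ===== PORT A =====
def validation_fit_py (primary_file : String) (validation_commands : List String) : String :=
  let lower_file := PySem.Str.lower primary_file
  let joined := PySem.Str.lower (PySem.Str.join " " validation_commands)
  if PySem.Str.endswith lower_file ".rs" then
    if PySem.Str.isIn "cargo test" joined then "strong" else "weak"
  else if ([".ts", ".tsx", ".js", ".jsx"] : List String).any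
          (fun suf => PySem.Str.endswith lower_file suf) then
    if (["pnpm test", "npm test", "yarn test", "vitest", "jest"] : List String).any
        (fun token => PySem.Str.isIn token joined) then "strong" else "weak"
  else if PySem.Str.endswith lower_file ".py" then
    if (["pytest", "python -m pytest", "uv run pytest"] : List String).any
        (fun token => PySem.Str.isIn token joined) then "strong" else "weak"
  else "unknown"

-- ===== PORT B =====
def pvJsTokens : List String := ["pnpm test", "npm test", "yarn test", "vitest", "jest"]

def pvExtTokens : PySem.Dict String (List String) :=
  PySem.Dict.ofList
    [("rs", ["cargo test"]),
     ("ts", pvJsTokens), ("tsx", pvJsTokens), ("js", pvJsTokens), ("jsx", pvJsTokens),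
     ("py", ["pytest", "python -m pytest", "uv run pytest"])]

-- the for/else loop of Source B: walk the reversed characters, collect until the
-- first '.' (break → some collected), none if the loop runs off the end
def pvExtScan : List Char → Option (List Char)
  | [] => none
  | c :: rest => if c = '.' then some [] else (pvExtScan rest).map (fun k => c :: k)

def validation_fit_py_alt (primary_file : String) (validation_commands : List String) : String :=
  match pvExtScan (PySem.Str.lower primary_file).toList.reverse with
  | none => "unknown"
  | some extRev =>
    match pvExtTokens.get? (String.ofList extRev.reverse) with
    | none => "unknown"
    | some tokens =>
      let joined := PySem.Str.lower (PySem.Str.join " " validation_commands)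
      if tokens.any (fun token => PySem.Str.isIn token joined) then "strong" else "weak"

-- ===== PRECONDITION & SPEC =====
def Spec_validation_fit_py (primary_file : String) (validation_commands : List String) (out : String) : Prop := out = validation_fit_py_alt primary_file validation_commands
instance (primary_file : String) (validation_commands : List String) (out : String) : Decidable (Spec_validation_fit_py primary_file validation_commands out) := by unfold Spec_validation_fit_py; infer_instance

-- ===== CLAIM (what is proved, stated in full; the proofs are below) =====
def Claim_equal_validation_fit_py : Prop := ∀ (primary_file : String) (validation_commands : List String), Dom_validation_fit_py primary_file validation_commands → Spec_validation_fit_py primary_file validation_commands (validation_fit_py primary_file validation_commands)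

-- ===== LEMMAS AND PROOFS =====

lemma pvExtScan_eq_some_iff (r k : List Char) (hk : '.' ∉ k) :
    pvExtScan r = some k ↔ k ++ ['.'] <+: r := by
  induction r generalizing k with
  | nil => simp [pvExtScan]
  | cons c rest ih =>
    simp only [pvExtScan]
    by_cases hc : c = '.'
    · subst hc
      rw [if_pos rfl]
      cases k with
      | nil => simp
      | cons k0 k' =>
        have h0 : k0 ≠ '.' := fun h => hk (h ▸ List.mem_cons_self)
        simp [List.cons_prefix_cons, h0]
    · rw [if_neg hc]
      cases k with
      | nil => simp [List.cons_prefix_cons, Ne.symm hc]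
      | cons k0 k' =>
        have hk' : '.' ∉ k' := fun h => hk (List.mem_cons_of_mem _ h)
        simp only [List.cons_append, List.cons_prefix_cons]
        constructor
        · intro h
          rcases Option.map_eq_some_iff.mp h with ⟨m, hm, hcons⟩
          injection hcons with h1 h2
          subst h1; subst h2
          exact ⟨rfl, (ih m hk').mp hm⟩
        · rintro ⟨rfl, hpre⟩
          exact Option.map_eq_some_iff.mpr ⟨k', (ih k' hk').mpr hpre, rfl⟩

-- endswith "."++ext ↔ the backwards scan returns ext reversed
lemma endswith_iff_scan (s : String) (k : List Char) (hk : '.' ∉ k) :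
    PySem.Str.endswith s (String.ofList ('.' :: k.reverse)) = true ↔
      pvExtScan s.toList.reverse = some k := by
  rw [pvExtScan_eq_some_iff _ _ hk]
  have h1 : PySem.Str.endswith s (String.ofList ('.' :: k.reverse)) = true ↔
      ('.' :: k.reverse) <:+ s.toList := by
    simp [PySem.Chars.endswith_iff, String.toList_ofList]
  rw [h1]
  constructor
  · intro h
    simpa using List.reverse_prefix.mpr h
  · intro h
    have h2 : ('.' :: k.reverse).reverse <+: s.toList.reverse := by simpa using h
    exact List.reverse_prefix.mp h2

lemma pvExtTokens_mk : pvExtTokens = PySem.Dict.mk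
    [("rs", ["cargo test"]),
     ("ts", pvJsTokens), ("tsx", pvJsTokens), ("js", pvJsTokens), ("jsx", pvJsTokens),
     ("py", ["pytest", "python -m pytest", "uv run pytest"])] := rfl

lemma pvTok_rs : pvExtTokens.get? "rs" = some ["cargo test"] := rfl
lemma pvTok_ts : pvExtTokens.get? "ts" = some pvJsTokens := rfl
lemma pvTok_tsx : pvExtTokens.get? "tsx" = some pvJsTokens := rfl
lemma pvTok_js : pvExtTokens.get? "js" = some pvJsTokens := rfl
lemma pvTok_jsx : pvExtTokens.get? "jsx" = some pvJsTokens := rfl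
lemma pvTok_py : pvExtTokens.get? "py" = some ["pytest", "python -m pytest", "uv run pytest"] := rfl

-- ===== VERDICT (by name: the statement is the Claim_ definition above) =====
theorem validation_fit_py_spec : Claim_equal_validation_fit_py := by
  intro primary_file validation_commands _
  unfold Spec_validation_fit_py validation_fit_py validation_fit_py_alt
  set lf := PySem.Str.lower primary_file with hlf
  have e_rs : PySem.Str.endswith lf ".rs" = true ↔
      pvExtScan lf.toList.reverse = some ['s','r'] := by
    simpa using endswith_iff_scan lf ['s','r'] (by decide)
  have e_ts : PySem.Str.endswith lf ".ts" = true ↔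
      pvExtScan lf.toList.reverse = some ['s','t'] := by
    simpa using endswith_iff_scan lf ['s','t'] (by decide)
  have e_tsx : PySem.Str.endswith lf ".tsx" = true ↔
      pvExtScan lf.toList.reverse = some ['x','s','t'] := by
    simpa using endswith_iff_scan lf ['x','s','t'] (by decide)
  have e_js : PySem.Str.endswith lf ".js" = true ↔
      pvExtScan lf.toList.reverse = some ['s','j'] := by
    simpa using endswith_iff_scan lf ['s','j'] (by decide)
  have e_jsx : PySem.Str.endswith lf ".jsx" = true ↔
      pvExtScan lf.toList.reverse = some ['x','s','j'] := by
    simpa using endswith_iff_scan lf ['x','s','j'] (by decide)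
  have e_py : PySem.Str.endswith lf ".py" = true ↔
      pvExtScan lf.toList.reverse = some ['y','p'] := by
    simpa using endswith_iff_scan lf ['y','p'] (by decide)
  cases hscan : pvExtScan lf.toList.reverse with
  | none =>
    have r1 : PySem.Str.endswith lf ".rs" = false := by
      rw [Bool.eq_false_iff]; intro h; simpa [hscan] using e_rs.mp h
    have r2 : PySem.Str.endswith lf ".ts" = false := by
      rw [Bool.eq_false_iff]; intro h; simpa [hscan] using e_ts.mp h
    have r3 : PySem.Str.endswith lf ".tsx" = false := by
      rw [Bool.eq_false_iff]; intro h; simpa [hscan] using e_tsx.mp h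
    have r4 : PySem.Str.endswith lf ".js" = false := by
      rw [Bool.eq_false_iff]; intro h; simpa [hscan] using e_js.mp h
    have r5 : PySem.Str.endswith lf ".jsx" = false := by
      rw [Bool.eq_false_iff]; intro h; simpa [hscan] using e_jsx.mp h
    have r6 : PySem.Str.endswith lf ".py" = false := by
      rw [Bool.eq_false_iff]; intro h; simpa [hscan] using e_py.mp h
    simp at r1 r2 r3 r4 r5 r6
    simp [r1, r2, r3, r4, r5, r6]
  | some k =>
    have hne : ∀ (s : String), k ≠ s.toList.reverse →
        (s == String.ofList k.reverse) = false := by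
      intro s hm
      rw [beq_eq_false_iff_ne]
      intro hEq
      apply hm
      have h2 := congrArg String.toList hEq
      rw [String.toList_ofList] at h2
      have h3 : s.toList.reverse = k := by simpa using congrArg List.reverse h2
      exact h3.symm
    by_cases h1 : k = ['s','r']
    · subst h1
      have t1 : PySem.Str.endswith lf ".rs" = true := e_rs.mpr hscan
      simp at t1
      simp [t1, pvTok_rs]
    · by_cases h2 : k = ['s','t']
      · subst h2
        have f1 : PySem.Str.endswith lf ".rs" = false := by
          rw [Bool.eq_false_iff]; intro h
          have := e_rs.mp h; rw [hscan] at this; simp at this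
        have t2 : PySem.Str.endswith lf ".ts" = true := e_ts.mpr hscan
        simp at f1 t2
        simp [f1, t2, pvTok_ts, pvJsTokens]
      · by_cases h3 : k = ['x','s','t']
        · subst h3
          have f1 : PySem.Str.endswith lf ".rs" = false := by
            rw [Bool.eq_false_iff]; intro h
            have := e_rs.mp h; rw [hscan] at this; simp at this
          have t3 : PySem.Str.endswith lf ".tsx" = true := e_tsx.mpr hscan
          simp at f1 t3
          simp [f1, t3, pvTok_tsx, pvJsTokens]
        · by_cases h4 : k = ['s','j']
          · subst h4
            have f1 : PySem.Str.endswith lf ".rs" = false := by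
              rw [Bool.eq_false_iff]; intro h
              have := e_rs.mp h; rw [hscan] at this; simp at this
            have t4 : PySem.Str.endswith lf ".js" = true := e_js.mpr hscan
            simp at f1 t4
            simp [f1, t4, pvTok_js, pvJsTokens]
          · by_cases h5 : k = ['x','s','j']
            · subst h5
              have f1 : PySem.Str.endswith lf ".rs" = false := by
                rw [Bool.eq_false_iff]; intro h
                have := e_rs.mp h; rw [hscan] at this; simp at this
              have t5 : PySem.Str.endswith lf ".jsx" = true := e_jsx.mpr hscan
              simp at f1 t5
              simp [f1, t5, pvTok_jsx, pvJsTokens]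
            · by_cases h6 : k = ['y','p']
              · subst h6
                have f1 : PySem.Str.endswith lf ".rs" = false := by
                  rw [Bool.eq_false_iff]; intro h
                  have := e_rs.mp h; rw [hscan] at this; simp at this
                have f2 : PySem.Str.endswith lf ".ts" = false := by
                  rw [Bool.eq_false_iff]; intro h
                  have := e_ts.mp h; rw [hscan] at this; simp at this
                have f3 : PySem.Str.endswith lf ".tsx" = false := by
                  rw [Bool.eq_false_iff]; intro h
                  have := e_tsx.mp h; rw [hscan] at this; simp at this
                have f4 : PySem.Str.endswith lf ".js" = false := by
                  rw [Bool.eq_false_iff]; intro h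
                  have := e_js.mp h; rw [hscan] at this; simp at this
                have f5 : PySem.Str.endswith lf ".jsx" = false := by
                  rw [Bool.eq_false_iff]; intro h
                  have := e_jsx.mp h; rw [hscan] at this; simp at this
                have t6 : PySem.Str.endswith lf ".py" = true := e_py.mpr hscan
                simp at f1 f2 f3 f4 f5 t6
                simp [f1, f2, f3, f4, f5, t6, pvTok_py]
              · have f1 : PySem.Str.endswith lf ".rs" = false := by
                  rw [Bool.eq_false_iff]; intro h
                  have := e_rs.mp h; rw [hscan] at this; simp at this; exact h1 this
                have f2 : PySem.Str.endswith lf ".ts" = false := by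
                  rw [Bool.eq_false_iff]; intro h
                  have := e_ts.mp h; rw [hscan] at this; simp at this; exact h2 this
                have f3 : PySem.Str.endswith lf ".tsx" = false := by
                  rw [Bool.eq_false_iff]; intro h
                  have := e_tsx.mp h; rw [hscan] at this; simp at this; exact h3 this
                have f4 : PySem.Str.endswith lf ".js" = false := by
                  rw [Bool.eq_false_iff]; intro h
                  have := e_js.mp h; rw [hscan] at this; simp at this; exact h4 this
                have f5 : PySem.Str.endswith lf ".jsx" = false := by
                  rw [Bool.eq_false_iff]; intro h
                  have := e_jsx.mp h; rw [hscan] at this; simp at this; exact h5 this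
                have f6 : PySem.Str.endswith lf ".py" = false := by
                  rw [Bool.eq_false_iff]; intro h
                  have := e_py.mp h; rw [hscan] at this; simp at this; exact h6 this
                have g1 := hne "rs" (by rw [show (("rs":String).toList.reverse) = (['s','r'] : List Char) from rfl]; exact h1)
                have g2 := hne "ts" (by rw [show (("ts":String).toList.reverse) = (['s','t'] : List Char) from rfl]; exact h2)
                have g3 := hne "tsx" (by rw [show (("tsx":String).toList.reverse) = (['x','s','t'] : List Char) from rfl]; exact h3)
                have g4 := hne "js" (by rw [show (("js":String).toList.reverse) = (['s','j'] : List Char) from rfl]; exact h4)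
                have g5 := hne "jsx" (by rw [show (("jsx":String).toList.reverse) = (['x','s','j'] : List Char) from rfl]; exact h5)
                have g6 := hne "py" (by rw [show (("py":String).toList.reverse) = (['y','p'] : List Char) from rfl]; exact h6)
                simp at f1 f2 f3 f4 f5 f6
                rw [pvExtTokens_mk]
                simp [PySem.Dict.get?, f1, f2, f3, f4, f5, f6, g1, g2, g3, g4, g5, g6]
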